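-- pv_equiv track=rewrite | github.com/KoretyAutomate/DR_2_Podcast | clinical_research.py | _classify_study_type
-- ===== SOURCE A (Python) =====
-- from typing import Any, Dict, List, Optional, Tuple
--
-- def _classify_study_type(pub_types: List[str]) -> str:
--     """Classify study type from PubMed PublicationType elements (no LLM)."""
--     pt_lower = [p.lower() for p in pub_types]
--     if any("meta-analysis" in p for p in pt_lower):
--         return "meta-analysis"
--     if any("systematic review" in p for p in pt_lower):
--         return "systematic-review"
--     if any("randomized controlled trial" in p for p in pt_lower):
--         return "RCT"
--     if any("clinical trial" in p for p in pt_lower):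
--         return "clinical-trial"
--     if any("observational study" in p for p in pt_lower):
--         return "observational"
--     if any("cohort" in p for p in pt_lower):
--         return "cohort"
--     if any("case report" in p for p in pt_lower):
--         return "case-report"
--     if any("review" in p for p in pt_lower):
--         return "review"
--     if any("guideline" in p or "practice guideline" in p for p in pt_lower):
--         return "guideline"
--     if any("retracted publication" in p for p in pt_lower):
--         return "retracted"
--     return "other"
-- ===== SOURCE B (Python) =====
-- from typing import List
--
-- # (substring, label) in descending priority order
-- _PATTERNS = [
--     ("meta-analysis", "meta-analysis"),
--     ("systematic review", "systematic-review"),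
--     ("randomized controlled trial", "RCT"),
--     ("clinical trial", "clinical-trial"),
--     ("observational study", "observational"),
--     ("cohort", "cohort"),
--     ("case report", "case-report"),
--     ("review", "review"),
--     ("guideline", "guideline"),
--     ("retracted publication", "retracted"),
-- ]
--
-- def _classify_study_type(pub_types: List[str]) -> str:
--     """Classify study type from PubMed PublicationType elements (no LLM)."""
--     best = len(_PATTERNS)  # index of best (lowest) matching priority so far
--     for p in pub_types:
--         pl = p.lower()
--         for i, (pat, _label) in enumerate(_PATTERNS):
--             if pat in pl:
--                 if i < best:
--                     best = i
--                 break
--     return _PATTERNS[best][1] if best < len(_PATTERNS) else "other"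
-- ===== Notes on version B (the rewrite author's own statement) =====
-- stated objective: alternative
-- what changed: Replaces ten sequential any()-rescans of the whole list with a single pass over pub_types that keeps a running minimum priority index into an ordered (pattern, label) table, returning the label at the best index (or 'other').
import Mathlib
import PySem

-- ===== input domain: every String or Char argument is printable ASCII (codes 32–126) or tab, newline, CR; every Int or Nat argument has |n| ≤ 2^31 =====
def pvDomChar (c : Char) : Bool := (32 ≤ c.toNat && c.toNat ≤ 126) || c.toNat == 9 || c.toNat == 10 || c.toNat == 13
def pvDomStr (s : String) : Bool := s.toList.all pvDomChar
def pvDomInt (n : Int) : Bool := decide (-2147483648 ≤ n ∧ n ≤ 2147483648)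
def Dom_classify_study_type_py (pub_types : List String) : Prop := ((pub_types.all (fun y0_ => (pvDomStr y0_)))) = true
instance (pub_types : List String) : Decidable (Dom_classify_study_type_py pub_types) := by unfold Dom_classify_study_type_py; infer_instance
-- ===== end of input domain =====

-- B replaces A's ten sequential any()-scans by one pass over pub_types keeping a running
-- minimum priority index into an ordered (pattern, label) table (objective: alternative).

-- ===== PORT A =====
def classify_study_type_py (pub_types : List String) : String :=
  let pt_lower := pub_types.map (fun p => PySem.Str.lower p)
  if pt_lower.any (fun p => PySem.Str.isIn "meta-analysis" p) then "meta-analysis"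
  else if pt_lower.any (fun p => PySem.Str.isIn "systematic review" p) then "systematic-review"
  else if pt_lower.any (fun p => PySem.Str.isIn "randomized controlled trial" p) then "RCT"
  else if pt_lower.any (fun p => PySem.Str.isIn "clinical trial" p) then "clinical-trial"
  else if pt_lower.any (fun p => PySem.Str.isIn "observational study" p) then "observational"
  else if pt_lower.any (fun p => PySem.Str.isIn "cohort" p) then "cohort"
  else if pt_lower.any (fun p => PySem.Str.isIn "case report" p) then "case-report"
  else if pt_lower.any (fun p => PySem.Str.isIn "review" p) then "review"
  else if pt_lower.any (fun p => PySem.Str.isIn "guideline" p || PySem.Str.isIn "practice guideline" p) then "guideline"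
  else if pt_lower.any (fun p => PySem.Str.isIn "retracted publication" p) then "retracted"
  else "other"

-- ===== PORT B =====
-- the module-level _PATTERNS table of Source B
def pvPatterns : List (String × String) :=
  [("meta-analysis", "meta-analysis"),
   ("systematic review", "systematic-review"),
   ("randomized controlled trial", "RCT"),
   ("clinical trial", "clinical-trial"),
   ("observational study", "observational"),
   ("cohort", "cohort"),
   ("case report", "case-report"),
   ("review", "review"),
   ("guideline", "guideline"),
   ("retracted publication", "retracted")]

-- inner loop of Source B: 'for i, (pat, _label) in enumerate(_PATTERNS): if pat in pl: (if i < best: best = i); break'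
def pvInner (pl : String) : List (String × String) → Nat → Nat → Nat
  | [], _i, best => best
  | (pat, _) :: rest, i, best =>
      if PySem.Str.isIn pat pl then (if i < best then i else best) else pvInner pl rest (i + 1) best

def classify_study_type_py_alt (pub_types : List String) : String :=
  let best := pub_types.foldl (fun best p => pvInner (PySem.Str.lower p) pvPatterns 0 best) pvPatterns.length
  if best < pvPatterns.length then (pvPatterns.getD best ("", "other")).2 else "other"

-- ===== PRECONDITION & SPEC =====
def Spec_classify_study_type_py (pub_types : List String) (out : String) : Prop := out = classify_study_type_py_alt pub_types
instance (pub_types : List String) (out : String) : Decidable (Spec_classify_study_type_py pub_types out) := by unfold Spec_classify_study_type_py; infer_instance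

-- ===== CLAIM (what is proved, stated in full; the proofs are below) =====
def Claim_equal_classify_study_type_py : Prop := ∀ (pub_types : List String), Dom_classify_study_type_py pub_types → Spec_classify_study_type_py pub_types (classify_study_type_py pub_types)

-- ===== LEMMAS AND PROOFS =====

-- pattern string at priority index k (proof-side view of pvPatterns)
def pvPat : Nat → String
  | 0 => "meta-analysis"
  | 1 => "systematic review"
  | 2 => "randomized controlled trial"
  | 3 => "clinical trial"
  | 4 => "observational study"
  | 5 => "cohort"
  | 6 => "case report"
  | 7 => "review"
  | 8 => "guideline"
  | _ => "retracted publication"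

-- first-match index chain over a list of candidate indices, default d
def pvChain : List Nat → Nat → (Nat → Bool) → Nat
  | [], d, _ => d
  | k :: ks, d, M => if M k then k else pvChain ks d M

-- first pattern index matched by the (already lowered) string pl, as an Option
def pvMmo (pl : String) : List (String × String) → Nat → Option Nat
  | [], _ => none
  | (pat, _) :: rest, i => if PySem.Str.isIn pat pl then some i else pvMmo pl rest (i + 1)

def pvMm (x : String) : Nat := (pvMmo (PySem.Str.lower x) pvPatterns 0).getD 10

def pvMidx : List String → Nat
  | [] => 10
  | x :: xs => min (pvMm x) (pvMidx xs)

def pvLabel (k : Nat) : String := if k < 10 then (pvPatterns.getD k ("", "other")).2 else "other"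

def pvCI (xs : List String) : Nat :=
  pvChain [0, 1, 2, 3, 4, 5, 6, 7, 8, 9] 10
    (fun k => xs.any (fun p => PySem.Str.isIn (pvPat k) (PySem.Str.lower p)))

-- a string containing "practice guideline" also contains "guideline", so A's or-condition collapses
lemma pvGuide (q : String) :
    (PySem.Str.isIn "guideline" q || PySem.Str.isIn "practice guideline" q) = PySem.Str.isIn "guideline" q := by
  cases h : PySem.Str.isIn "guideline" q with
  | true => simp
  | false =>
    simp only [Bool.false_or]
    cases h2 : PySem.Str.isIn "practice guideline" q with
    | false => rfl
    | true =>
      exfalso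
      rw [PySem.Str.isIn_iff_infix] at h2
      have hsub : ("guideline" : String).toList <:+: ("practice guideline" : String).toList := by decide
      have h3 : PySem.Str.isIn "guideline" q = true := by
        rw [PySem.Str.isIn_iff_infix]; exact hsub.trans h2
      rw [h] at h3
      exact Bool.false_ne_true h3

lemma pvChain_ge (a : Nat) : ∀ (ks : List Nat) (d : Nat) (M : Nat → Bool),
    (∀ j ∈ ks, a ≤ j) → a ≤ d → a ≤ pvChain ks d M := by
  intro ks
  induction ks with
  | nil => intro d M _ hd; simpa [pvChain] using hd
  | cons k ks ih =>
    intro d M hks hd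
    simp only [pvChain]
    split
    · exact hks k (by simp)
    · exact ih d M (fun j hj => hks j (by simp [hj])) hd

lemma pvChain_or : ∀ (ks : List Nat) (d : Nat) (p q : Nat → Bool),
    ks.Pairwise (· < ·) → (∀ j ∈ ks, j < d) →
    pvChain ks d (fun k => p k || q k) = min (pvChain ks d p) (pvChain ks d q) := by
  intro ks
  induction ks with
  | nil => intro d p q _ _; simp [pvChain]
  | cons k ks ih =>
    intro d p q hpw hlt
    have hk : ∀ j ∈ ks, k + 1 ≤ j := fun j hj => (List.pairwise_cons.mp hpw).1 j hj
    have hkd : k + 1 ≤ d := hlt k (by simp)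
    have hgp := pvChain_ge (k + 1) ks d p hk hkd
    have hgq := pvChain_ge (k + 1) ks d q hk hkd
    have ihr := ih d p q (List.pairwise_cons.mp hpw).2 (fun j hj => hlt j (by simp [hj]))
    simp only [pvChain]
    rcases Bool.eq_false_or_eq_true (p k) with hp | hp <;>
      rcases Bool.eq_false_or_eq_true (q k) with hq | hq <;>
      simp only [hp, hq, ihr] <;> simp <;> omega

lemma pvInner_eq (pl : String) : ∀ (l : List (String × String)) (i b : Nat),
    pvInner pl l i b = min b ((pvMmo pl l i).getD b) := by
  intro l
  induction l with
  | nil => intro i b; simp [pvInner, pvMmo]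
  | cons hd tl ih =>
    intro i b
    obtain ⟨pat, lab⟩ := hd
    simp only [pvInner, pvMmo]
    split_ifs with hc hlt
    · simp only [Option.getD_some]; omega
    · simp only [Option.getD_some]; omega
    · exact ih (i + 1) b

lemma pvStep (b : Nat) (x : String) (hb : b ≤ 10) :
    pvInner (PySem.Str.lower x) pvPatterns 0 b = min b (pvMm x) := by
  rw [pvInner_eq]
  unfold pvMm
  cases h : pvMmo (PySem.Str.lower x) pvPatterns 0 with
  | none => simp only [Option.getD_none]; omega
  | some k => simp only [Option.getD_some]

lemma pvFoldB : ∀ (xs : List String) (b : Nat), b ≤ 10 →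
    xs.foldl (fun best p => pvInner (PySem.Str.lower p) pvPatterns 0 best) b = min b (pvMidx xs) := by
  intro xs
  induction xs with
  | nil => intro b hb; simp [pvMidx]; omega
  | cons x xs ih =>
    intro b hb
    simp only [List.foldl_cons]
    rw [pvStep b x hb, ih (min b (pvMm x)) (le_trans (Nat.min_le_left _ _) hb), pvMidx,
      Nat.min_assoc]

lemma pvMidx_le (xs : List String) : pvMidx xs ≤ 10 := by
  induction xs with
  | nil => simp [pvMidx]
  | cons x xs ih => simp only [pvMidx]; exact le_trans (Nat.min_le_right _ _) ih

set_option maxHeartbeats 1600000 in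
lemma pvMm_eq_chain (x : String) :
    pvMm x = pvChain [0, 1, 2, 3, 4, 5, 6, 7, 8, 9] 10
      (fun k => PySem.Str.isIn (pvPat k) (PySem.Str.lower x)) := by
  simp only [pvMm, pvMmo, pvChain, pvPatterns, pvPat]
  split_ifs <;> rfl

lemma pvCI_nil : pvCI [] = 10 := by
  simp [pvCI, pvChain]

lemma pvCI_cons (x : String) (xs : List String) : pvCI (x :: xs) = min (pvMm x) (pvCI xs) := by
  unfold pvCI
  simp only [List.any_cons]
  rw [pvChain_or _ _ _ _ (by decide) (by decide), ← pvMm_eq_chain]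

lemma pvMidx_eq_CI (xs : List String) : pvMidx xs = pvCI xs := by
  induction xs with
  | nil => simp [pvMidx, pvCI_nil]
  | cons x xs ih => rw [pvMidx, ih, pvCI_cons]

lemma pvB_eq (xs : List String) : classify_study_type_py_alt xs = pvLabel (pvMidx xs) := by
  unfold classify_study_type_py_alt
  have hl : pvPatterns.length = 10 := rfl
  simp only [hl]
  rw [pvFoldB xs 10 (le_refl 10), Nat.min_eq_right (pvMidx_le xs)]
  rfl

set_option maxHeartbeats 1600000 in
lemma pvA_eq (xs : List String) : classify_study_type_py xs = pvLabel (pvCI xs) := by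
  unfold classify_study_type_py pvCI
  simp only [pvChain, pvPat, List.any_map, Function.comp_def, pvGuide]
  split_ifs <;> rfl

-- ===== VERDICT (by name: the statement is the Claim_ definition above) =====
theorem classify_study_type_py_spec : Claim_equal_classify_study_type_py := by
  intro xs _
  unfold Spec_classify_study_type_py
  rw [pvA_eq, pvB_eq, pvMidx_eq_CI]
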